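-- pv_equiv track=rewrite | github.com/ypzhang725/Longshot | emp-sh2pc/funcPy.py | computeBin
-- ===== SOURCE A (Python) =====
-- def computeBin(data, markers, dp):
--     counter = dp.copy()
--     size = len(data)
--     binNum = len(dp)
--     bins = [binNum] * size
--     # real records
--     for i in range(size):
--         bin_num = data[i] - 1
--         if markers[i] == 1:
--             if counter[bin_num] > 0:
--                 bins[i] = bin_num
--                 counter[bin_num] = counter[bin_num] - 1
--     # dummy records
--     for i in range(size):
--         if markers[i] == 2:
--             for j in range(binNum):
--                 if bins[i] == binNum and counter[j] > 0 :
--                     bins[i] = j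
--                     counter[j] = counter[j] - 1
--     return bins
-- ===== SOURCE B (Python) =====
-- def computeBin(data, markers, dp):
--     binNum = len(dp)
--     rem = list(dp)
--     # real records: single zip pass, appending
--     bins = []
--     for d, m in zip(data, markers):
--         if m == 1 and rem[d - 1] > 0:
--             bins.append(d - 1)
--             rem[d - 1] -= 1
--         else:
--             bins.append(binNum)
--     # dummy records: monotone pointer over bins (counters only shrink)
--     p = 0
--     out = []
--     for b, m in zip(bins, markers):
--         if m == 2:
--             while p < binNum and rem[p] <= 0:
--                 p += 1
--             if p < binNum:
--                 out.append(p)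
--                 rem[p] -= 1
--             else:
--                 out.append(b)
--         else:
--             out.append(b)
--     return out
-- ===== Notes on version B (the rewrite author's own statement) =====
-- stated objective: alternative
-- what changed: The dummy pass no longer rescans all bins for every record: because capacities only shrink, a monotone pointer tracks the smallest still-available bin, and both passes stream over zipped lists building the result instead of index-assigning into a preallocated list (O(size+binNum) scans vs A's O(size*binNum) worst case; not measurably faster on the generated inputs).
import Mathlib
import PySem

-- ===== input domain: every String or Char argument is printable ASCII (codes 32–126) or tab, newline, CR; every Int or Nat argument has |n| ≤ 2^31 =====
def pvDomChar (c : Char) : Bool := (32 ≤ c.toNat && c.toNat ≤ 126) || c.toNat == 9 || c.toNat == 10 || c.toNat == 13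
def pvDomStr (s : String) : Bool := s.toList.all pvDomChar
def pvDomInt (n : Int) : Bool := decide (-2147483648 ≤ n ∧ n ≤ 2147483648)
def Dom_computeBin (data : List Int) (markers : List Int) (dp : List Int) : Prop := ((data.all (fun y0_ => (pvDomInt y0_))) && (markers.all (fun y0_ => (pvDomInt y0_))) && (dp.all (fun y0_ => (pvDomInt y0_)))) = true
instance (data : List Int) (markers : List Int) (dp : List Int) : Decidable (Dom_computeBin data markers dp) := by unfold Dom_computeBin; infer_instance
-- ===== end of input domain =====

-- B replaces A's per-dummy rescan of all bins by a monotone pointer (capacities only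
-- shrink) and builds the result by streaming over zipped lists instead of index
-- assignment (an alternative structure; no speed-up was measured on generated inputs);
-- equivalence is about the return value (neither function mutates its arguments).

-- ===== PORT A =====
-- body of A's first for-loop (state = (bins, counter))
def aStep1 (data markers : List Int) (st : List Int × List Int) (i : Nat) : List Int × List Int :=
  let bin_num := PySem.List.pyGetD data (i : Int) 0 - 1
  if PySem.List.pyGetD markers (i : Int) 0 = 1 then
    if PySem.List.pyGetD st.2 bin_num 0 > 0 then
      (PySem.List.pySetD st.1 (i : Int) bin_num,
       PySem.List.pySetD st.2 bin_num (PySem.List.pyGetD st.2 bin_num 0 - 1))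
    else st
  else st

-- body of A's inner for-loop over j (state = (bins, counter))
def aStep2Inner (binNum i : Nat) (st : List Int × List Int) (j : Nat) : List Int × List Int :=
  if PySem.List.pyGetD st.1 (i : Int) 0 = (binNum : Int) ∧ PySem.List.pyGetD st.2 (j : Int) 0 > 0 then
    (PySem.List.pySetD st.1 (i : Int) (j : Int),
     PySem.List.pySetD st.2 (j : Int) (PySem.List.pyGetD st.2 (j : Int) 0 - 1))
  else st

-- body of A's second for-loop over i
def aStep2 (markers : List Int) (binNum : Nat) (st : List Int × List Int) (i : Nat) : List Int × List Int :=
  if PySem.List.pyGetD markers (i : Int) 0 = 2 then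
    (List.range binNum).foldl (aStep2Inner binNum i) st
  else st

def computeBin (data : List Int) (markers : List Int) (dp : List Int) : List Int :=
  let size := data.length
  let binNum := dp.length
  let st1 := (List.range size).foldl (aStep1 data markers) (List.replicate size (binNum : Int), dp)
  ((List.range size).foldl (aStep2 markers binNum) st1).1

-- ===== PORT B =====
-- first pass of Source B: stream over zip(data, markers), returns (bins, rem)
def altPass1 (binNum : Int) : List (Int × Int) → List Int → List Int × List Int
  | [], rem => ([], rem)
  | (d, m) :: rest, rem =>
    if m = 1 ∧ PySem.List.pyGetD rem (d - 1) 0 > 0 then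
      let st := altPass1 binNum rest (PySem.List.pySetD rem (d - 1) (PySem.List.pyGetD rem (d - 1) 0 - 1))
      ((d - 1) :: st.1, st.2)
    else
      let st := altPass1 binNum rest rem
      (binNum :: st.1, st.2)

-- the while-loop of Source B: advance p past exhausted bins
def skipZeros (rem : List Int) (binNum : Nat) (p : Nat) : Nat :=
  if h : p < binNum ∧ rem.getD p 0 ≤ 0 then skipZeros rem binNum (p + 1) else p
termination_by binNum - p
decreasing_by omega

-- second pass of Source B: stream over zip(bins, markers) with the monotone pointer p
def altPass2 (binNum : Nat) : List (Int × Int) → List Int → Nat → List Int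
  | [], _, _ => []
  | (b, m) :: rest, rem, p =>
    if m = 2 then
      let p' := skipZeros rem binNum p
      if p' < binNum then
        (p' : Int) :: altPass2 binNum rest (rem.set p' (rem.getD p' 0 - 1)) p'
      else
        b :: altPass2 binNum rest rem p'
    else b :: altPass2 binNum rest rem p

def computeBin_alt (data : List Int) (markers : List Int) (dp : List Int) : List Int :=
  let binNum := dp.length
  let st := altPass1 (binNum : Int) (data.zip markers) dp
  altPass2 binNum (st.1.zip markers) st.2 0

-- ===== PRECONDITION & SPEC =====
-- Pre_ excludes exactly the inputs where A raises IndexError: markers shorter than data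
-- (A reads markers[i] for every i < len(data)), or a record with markers[i] == 1 whose
-- bin index data[i]-1 is outside Python's (wraparound) range for counter.
def Pre_computeBin (data : List Int) (markers : List Int) (dp : List Int) : Prop :=
  data.length ≤ markers.length ∧
  ∀ k : Nat, k < data.length →
    (markers.getD k 0 = 1 → PySem.Raise.InRange dp.length (data.getD k 0 - 1))
instance (data : List Int) (markers : List Int) (dp : List Int) : Decidable (Pre_computeBin data markers dp) := by unfold Pre_computeBin; infer_instance

def pvWitness_computeBin : List Int × List Int × List Int := ([1, 2, 1], [1, 2, 2], [2, 1])

def Spec_computeBin (data : List Int) (markers : List Int) (dp : List Int) (out : List Int) : Prop := out = computeBin_alt data markers dp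
instance (data : List Int) (markers : List Int) (dp : List Int) (out : List Int) : Decidable (Spec_computeBin data markers dp out) := by unfold Spec_computeBin; infer_instance

-- ===== CLAIM (what is proved, stated in full; the proofs are below) =====
def Claim_equal_computeBin : Prop := ∀ (data : List Int) (markers : List Int) (dp : List Int), Dom_computeBin data markers dp → Pre_computeBin data markers dp → Spec_computeBin data markers dp (computeBin data markers dp)

-- ===== LEMMAS AND PROOFS =====
-- ==== generic list helpers ====
theorem pvGetD_set_ne (l : List Int) (j j' : Nat) (v d : Int) (h : j' ≠ j) :
    (l.set j v).getD j' d = l.getD j' d := by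
  have h' : j ≠ j' := fun he => h he.symm
  simp [List.getD, List.getElem?_set, h']

theorem pvGetD_set_self (l : List Int) (j : Nat) (v d : Int) (h : j < l.length) :
    (l.set j v).getD j d = v := by
  simp [List.getD, List.getElem?_set, h]

theorem pvGetD_append_mid (l l' : List Int) (a d : Int) :
    (l ++ a :: l').getD l.length d = a := by simp

theorem pvSet_append_mid (l l' : List Int) (a v : Int) :
    (l ++ a :: l').set l.length v = l ++ v :: l' := by simp

theorem pvGetD_take (l : List Int) (n k : Nat) (d : Int) (h : k < n) :
    (l.take n).getD k d = l.getD k d := by simp [List.getD, h]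

theorem pvTake_succ (l : List Int) (n : Nat) (h : n < l.length) :
    l.take (n+1) = l.take n ++ [l[n]] := by
  rw [List.take_add_one, List.getElem?_eq_getElem h]; rfl

theorem pvGetD_zip (xs ys : List Int) (k : Nat) (h1 : k < xs.length) (h2 : k < ys.length) :
    (xs.zip ys).getD k (0,0) = (xs.getD k 0, ys.getD k 0) := by
  simp [List.getD, List.getElem?_zip_eq_some, h1, h2]

theorem pvZip_take_right (xs ys : List Int) : xs.zip (ys.take xs.length) = xs.zip ys := by
  induction xs generalizing ys with
  | nil => simp
  | cons x xs ih =>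
    cases ys with
    | nil => simp
    | cons y ys => simp [List.zip_cons_cons, ih]

-- ==== altPass1 facts ====
theorem altPass1_len1 (bn : Int) (xs : List (Int × Int)) (rem : List Int) :
    (altPass1 bn xs rem).1.length = xs.length := by
  induction xs generalizing rem with
  | nil => simp [altPass1]
  | cons x xs ih =>
    obtain ⟨d, m⟩ := x
    simp only [altPass1]
    split_ifs <;> simp [ih]

theorem altPass1_append (bn : Int) (xs ys : List (Int × Int)) (rem : List Int) :
    altPass1 bn (xs ++ ys) rem =
      ((altPass1 bn xs rem).1 ++ (altPass1 bn ys (altPass1 bn xs rem).2).1,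
       (altPass1 bn ys (altPass1 bn xs rem).2).2) := by
  induction xs generalizing rem with
  | nil => simp [altPass1]
  | cons x xs ih =>
    obtain ⟨d, m⟩ := x
    simp only [List.cons_append, altPass1]
    split_ifs <;> simp [ih]

theorem altPass1_marker (bn : Int) (xs : List (Int × Int)) (rem : List Int) (k : Nat)
    (hk : k < xs.length) (hm : (xs.getD k (0,0)).2 ≠ 1) :
    (altPass1 bn xs rem).1.getD k 0 = bn := by
  induction xs generalizing rem k with
  | nil => simp at hk
  | cons x xs ih =>
    obtain ⟨d, m⟩ := x
    cases k with
    | zero =>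
      simp only [List.getD_cons_zero] at hm
      simp only [altPass1]
      split_ifs with h
      · exact absurd h.1 hm
      · simp
    | succ k =>
      simp only [List.getD_cons_succ] at hm
      have hk' : k < xs.length := by simpa using hk
      simp only [altPass1]
      split_ifs with h
      · simpa using ih _ k hk' hm
      · simpa using ih rem k hk' hm

-- ==== pass 1 main ====
theorem pass1_gen (data markers : List Int) (bn : Int) :
    ∀ (n : Nat), n ≤ data.length → n ≤ markers.length → ∀ (counter tail : List Int),
    (List.range n).foldl (aStep1 data markers) (List.replicate n bn ++ tail, counter)
      = ((altPass1 bn ((data.take n).zip (markers.take n)) counter).1 ++ tail,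
         (altPass1 bn ((data.take n).zip (markers.take n)) counter).2) := by
  intro n
  induction n with
  | zero => intro _ _ counter tail; simp [altPass1]
  | succ n ih =>
    intro h1 h2 counter tail
    have hn1 : n < data.length := by omega
    have hn2 : n < markers.length := by omega
    rw [List.range_succ, List.foldl_append, List.foldl_cons, List.foldl_nil,
        List.replicate_succ', List.append_assoc, List.singleton_append]
    rw [ih (by omega) (by omega) counter (bn :: tail)]
    rw [pvTake_succ data n hn1, pvTake_succ markers n hn2,
        List.zip_append (by simp [hn1.le, hn2.le]), altPass1_append]
    set Z := (data.take n).zip (markers.take n) with hZ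
    set bs := (altPass1 bn Z counter).1 with hbs
    set r := (altPass1 bn Z counter).2 with hr
    have hbsl : bs.length = n := by
      rw [hbs, altPass1_len1]
      simp [hZ, hn1.le, hn2.le]
    -- evaluate the step of A at index n and the singleton altPass1
    simp only [aStep1, List.zip_cons_cons, List.zip_nil_right, altPass1,
      PySem.List.pyGetD_natCast, PySem.List.pySetD_natCast]
    rw [List.getD_eq_getElem data 0 hn1, List.getD_eq_getElem markers 0 hn2]
    by_cases hm : markers[n] = 1
    · by_cases hc : PySem.List.pyGetD r (data[n] - 1) 0 > 0
      · simp only [hm, hc, if_pos, and_self, if_true, true_and]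
        set v := data[n] - 1 with hv
        rw [← hbsl, pvSet_append_mid]
        simp
      · simp only [hm, hc, if_true, if_false, and_true, true_and]
        simp [hc]
    · simp [hm]

-- ==== skipZeros facts ====
theorem skipZeros_eq (rem : List Int) (bn p : Nat) :
    skipZeros rem bn p = if p < bn ∧ rem.getD p 0 ≤ 0 then skipZeros rem bn (p+1) else p := by
  rw [skipZeros]; split_ifs <;> simp_all

theorem skipZeros_spec (rem : List Int) (bn : Nat) :
    ∀ (m p : Nat), bn - p ≤ m →
      p ≤ skipZeros rem bn p ∧
      (p ≤ bn → skipZeros rem bn p ≤ bn) ∧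
      (∀ j, p ≤ j → j < skipZeros rem bn p → rem.getD j 0 ≤ 0) ∧
      (skipZeros rem bn p < bn → rem.getD (skipZeros rem bn p) 0 > 0) := by
  intro m
  induction m with
  | zero =>
    intro p hp
    have hge : ¬ (p < bn) := by omega
    rw [skipZeros_eq]
    simp only [hge, false_and, if_false]
    exact ⟨le_refl _, fun h => h, fun j h1 h2 => absurd h2 (by omega), fun h => h.elim⟩
  | succ m ih =>
    intro p hp
    by_cases h : p < bn ∧ rem.getD p 0 ≤ 0
    · have := ih (p+1) (by omega)
      rw [skipZeros_eq, if_pos h]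
      refine ⟨by omega, fun _ => this.2.1 (by omega), ?_, this.2.2.2⟩
      intro j hj1 hj2
      rcases Nat.eq_or_lt_of_le hj1 with rfl | hlt
      · exact h.2
      · exact this.2.2.1 j hlt hj2
    · rw [skipZeros_eq, if_neg h]
      refine ⟨le_refl _, fun hq => hq, fun j h1 h2 => absurd h2 (by omega), ?_⟩
      intro hlt
      by_contra hc
      exact h ⟨hlt, by omega⟩

theorem skipZeros_from (rem : List Int) (bn : Nat) :
    ∀ (m a b : Nat), b - a ≤ m → a ≤ b → b ≤ bn →
      (∀ j, a ≤ j → j < b → rem.getD j 0 ≤ 0) →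
      skipZeros rem bn a = skipZeros rem bn b := by
  intro m
  induction m with
  | zero =>
    intro a b h1 h2 _ _
    have hab : a = b := by omega
    subst hab
    rfl
  | succ m ih =>
    intro a b h1 h2 h3 h4
    rcases Nat.eq_or_lt_of_le h2 with rfl | hlt
    · rfl
    · rw [skipZeros_eq, if_pos ⟨by omega, h4 a (le_refl _) hlt⟩]
      exact ih (a+1) b (by omega) (by omega) h3 (fun j hj1 hj2 => h4 j (by omega) hj2)

-- ==== inner loop of A's pass 2 ====
theorem inner_id (bn i : Nat) (js : List Nat) (st : List Int × List Int)
    (h : PySem.List.pyGetD st.1 (i : Int) 0 ≠ (bn : Int)) :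
    js.foldl (aStep2Inner bn i) st = st := by
  induction js with
  | nil => rfl
  | cons j js ih =>
    rw [List.foldl_cons]
    have : aStep2Inner bn i st j = st := by
      simp only [aStep2Inner]
      rw [if_neg]; intro hc; exact h hc.1
    rw [this, ih]

theorem inner_char (bn i : Nat) :
    ∀ (m t : Nat), bn - t = m → ∀ (bins counter : List Int),
    bins.getD i 0 = (bn : Int) → i < bins.length →
    (List.range' t (bn - t)).foldl (aStep2Inner bn i) (bins, counter)
      = (if skipZeros counter bn t < bn
          then (bins.set i ((skipZeros counter bn t : Nat) : Int),
                counter.set (skipZeros counter bn t) (counter.getD (skipZeros counter bn t) 0 - 1))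
          else (bins, counter)) := by
  intro m
  induction m with
  | zero =>
    intro t hm bins counter hb hi
    have ht : ¬ (t < bn) := by omega
    rw [hm, skipZeros_eq]
    simp [ht]
  | succ m ih =>
    intro t hm bins counter hb hi
    have ht : t < bn := by omega
    rw [hm]
    rw [List.range'_succ, List.foldl_cons]
    by_cases hc : counter.getD t 0 > 0
    · have hstep : aStep2Inner bn i (bins, counter) t
          = (bins.set i ((t : Nat) : Int), counter.set t (counter.getD t 0 - 1)) := by
        simp only [aStep2Inner, PySem.List.pyGetD_natCast, PySem.List.pySetD_natCast]
        rw [if_pos ⟨hb, hc⟩]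
      rw [hstep]
      have hne : ((bins.set i ((t : Nat) : Int)).getD i 0 : Int) ≠ (bn : Int) := by
        rw [pvGetD_set_self _ _ _ _ hi]
        intro he
        have : t = bn := by exact_mod_cast he
        omega
      have hid := inner_id bn i (List.range' (t+1) m)
        ((bins.set i ((t : Nat) : Int)), counter.set t (counter.getD t 0 - 1))
        (by simpa using hne)
      rw [hid]
      have hskip : skipZeros counter bn t = t := by
        rw [skipZeros_eq, if_neg]; intro h; omega
      rw [hskip, if_pos ht]
    · have hstep : aStep2Inner bn i (bins, counter) t = (bins, counter) := by
        simp only [aStep2Inner, PySem.List.pyGetD_natCast, PySem.List.pySetD_natCast]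
        rw [if_neg]; intro h; exact hc h.2
      rw [hstep]
      have hskip : skipZeros counter bn t = skipZeros counter bn (t+1) := by
        rw [skipZeros_eq, if_pos ⟨ht, by omega⟩]
      have := ih (t+1) (by omega) bins counter hb hi
      rw [show bn - (t+1) = m by omega] at this
      rw [this, hskip]

-- ==== pass 2 main ====
theorem pass2_gen (markers : List Int) (bn : Nat) :
    ∀ (rest ms pre counter : List Int) (p : Nat),
    rest.length = ms.length →
    (∀ k, k < rest.length → markers.getD (pre.length + k) 0 = ms.getD k 0) →
    (∀ k, k < rest.length → ms.getD k 0 = 2 → rest.getD k 0 = (bn : Int)) →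
    p ≤ bn →
    (∀ j, j < p → counter.getD j 0 ≤ 0) →
    ((List.range' pre.length rest.length).foldl (aStep2 markers bn) (pre ++ rest, counter)).1
      = pre ++ altPass2 bn (rest.zip ms) counter p := by
  intro rest
  induction rest with
  | nil => intro ms pre counter p _ _ _ _ _; simp [altPass2]
  | cons b rest ih =>
    intro ms pre counter p hlen hmark hbm hp hinv
    cases ms with
    | nil => simp at hlen
    | cons mk ms =>
      have hlen' : rest.length = ms.length := by simpa using hlen
      rw [List.length_cons, List.range'_succ, List.foldl_cons]
      have hm0 : markers.getD pre.length 0 = mk := by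
        have := hmark 0 (by simp)
        simpa using this
      by_cases hmk : mk = 2
      · -- dummy record
        subst hmk
        have hb : b = (bn : Int) := by
          have := hbm 0 (by simp) (by simp)
          simpa using this
        have hstep : aStep2 markers bn (pre ++ b :: rest, counter) pre.length
            = (List.range bn).foldl (aStep2Inner bn pre.length) (pre ++ b :: rest, counter) := by
          simp only [aStep2, PySem.List.pyGetD_natCast]
          rw [if_pos (by rw [hm0])]
        rw [hstep, List.range_eq_range']
        have hchar := inner_char bn pre.length bn 0 (by omega) (pre ++ b :: rest) counter
          (by rw [pvGetD_append_mid, hb]) (by simp)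
        rw [show bn - 0 = bn from by omega] at hchar
        rw [hchar]
        have hsp := skipZeros_spec counter bn bn p (by omega)
        have hfrom : skipZeros counter bn 0 = skipZeros counter bn p :=
          skipZeros_from counter bn p 0 p (by omega) (by omega) hp (fun j _ hj => hinv j hj)
        rw [hfrom]
        set q := skipZeros counter bn p with hq
        have hq1 : p ≤ q := hsp.1
        have hq2 : q ≤ bn := hsp.2.1 hp
        have hq3 : ∀ j, p ≤ j → j < q → counter.getD j 0 ≤ 0 := hsp.2.2.1
        have hq4 : q < bn → counter.getD q 0 > 0 := hsp.2.2.2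
        have haltp : altPass2 bn ((b :: rest).zip (2 :: ms)) counter p
            = if q < bn
              then (q : Int) :: altPass2 bn (rest.zip ms) (counter.set q (counter.getD q 0 - 1)) q
              else b :: altPass2 bn (rest.zip ms) counter q := by
          simp only [List.zip_cons_cons, altPass2, ← hq]
          split_ifs <;> rfl
        rw [haltp]
        by_cases hqb : q < bn
        · rw [if_pos hqb, if_pos hqb]
          rw [pvSet_append_mid]
          have : pre ++ ((q : Nat) : Int) :: rest = (pre ++ [((q : Nat) : Int)]) ++ rest := by simp
          rw [this]
          rw [show pre.length + 1 = (pre ++ [((q : Nat) : Int)]).length from by simp]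
          rw [ih ms (pre ++ [((q : Nat) : Int)]) (counter.set q (counter.getD q 0 - 1)) q hlen'
            (by intro k hk
                have := hmark (k+1) (by simp; omega)
                simpa [Nat.add_assoc, Nat.add_comm 1 k] using this)
            (by intro k hk hms
                have := hbm (k+1) (by simp; omega) (by simpa using hms)
                simpa using this)
            hq2
            (by intro j hj
                rw [pvGetD_set_ne _ _ _ _ _ (by omega)]
                by_cases hjp : j < p
                · exact hinv j hjp
                · exact hq3 j (by omega) hj)]
          simp
        · rw [if_neg hqb, if_neg hqb]
          have hqbn : q = bn := by omega
          have : pre ++ b :: rest = (pre ++ [b]) ++ rest := by simp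
          rw [this]
          rw [show pre.length + 1 = (pre ++ [b]).length from by simp]
          rw [ih ms (pre ++ [b]) counter q hlen'
            (by intro k hk
                have := hmark (k+1) (by simp; omega)
                simpa [Nat.add_assoc, Nat.add_comm 1 k] using this)
            (by intro k hk hms
                have := hbm (k+1) (by simp; omega) (by simpa using hms)
                simpa using this)
            hq2
            (by intro j hj
                by_cases hjp : j < p
                · exact hinv j hjp
                · exact hq3 j (by omega) hj)]
          simp
      · -- non-dummy record
        have hstep : aStep2 markers bn (pre ++ b :: rest, counter) pre.length
            = (pre ++ b :: rest, counter) := by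
          simp only [aStep2, PySem.List.pyGetD_natCast]
          rw [if_neg (by rw [hm0]; exact_mod_cast hmk)]
        rw [hstep]
        have haltp : altPass2 bn ((b :: rest).zip (mk :: ms)) counter p
            = b :: altPass2 bn (rest.zip ms) counter p := by
          simp only [List.zip_cons_cons, altPass2]
          rw [if_neg hmk]
        rw [haltp]
        have : pre ++ b :: rest = (pre ++ [b]) ++ rest := by simp
        rw [this]
        rw [show pre.length + 1 = (pre ++ [b]).length from by simp]
        rw [ih ms (pre ++ [b]) counter p hlen'
          (by intro k hk
              have := hmark (k+1) (by simp; omega)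
              simpa [Nat.add_assoc, Nat.add_comm 1 k] using this)
          (by intro k hk hms
              have := hbm (k+1) (by simp; omega) (by simpa using hms)
              simpa using this)
          hp hinv]
        simp

-- ==== top-level assembly ====
theorem computeBin_spec : Claim_equal_computeBin := by
  intro data markers dp _ hpre
  obtain ⟨hlen, -⟩ := hpre
  unfold Spec_computeBin computeBin computeBin_alt
  simp only []
  have h1 := pass1_gen data markers ((dp.length : Nat) : Int) data.length (le_refl _) hlen dp []
  simp only [List.append_nil, List.take_length, pvZip_take_right] at h1
  rw [h1]
  have hzlen : (data.zip markers).length = data.length := by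
    rw [List.length_zip]; omega
  have hB1len : (altPass1 ((dp.length : Nat) : Int) (data.zip markers) dp).1.length = data.length := by
    rw [altPass1_len1, hzlen]
  have h2 := pass2_gen markers dp.length
    (altPass1 ((dp.length : Nat) : Int) (data.zip markers) dp).1
    (markers.take data.length) []
    (altPass1 ((dp.length : Nat) : Int) (data.zip markers) dp).2 0
    (by rw [hB1len, List.length_take]; omega)
    (by intro k hk
        rw [hB1len] at hk
        simp only [List.length_nil, Nat.zero_add]
        rw [pvGetD_take _ _ _ _ hk])
    (by intro k hk hms
        rw [hB1len] at hk
        rw [pvGetD_take _ _ _ _ hk] at hms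
        exact altPass1_marker _ _ _ k (by omega)
          (by rw [pvGetD_zip _ _ _ hk (by omega)]
              simp only [List.getD] at hms ⊢
              simp [hms]))
    (by omega)
    (by intro j hj; omega)
  simp only [List.length_nil, List.nil_append] at h2
  rw [hB1len] at h2
  rw [List.range_eq_range', h2, ← hB1len, pvZip_take_right]
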